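-- pv_equiv track=rewrite | github.com/sbFranj/Python | Boletin_8_Programacion_modular_1/Ejercicio14.py | contarLongitud
-- ===== SOURCE A (Python) =====
-- def contarLongitud(cadena1, cadena2):
--     cadena1
--     if len(cadena1)<len(cadena2):
--         cadena1=cadena2
--
--     elif len(cadena1)==len(cadena2):
--         l1=[]
--         l2=[]
--         for i in range(len(cadena1)):
--             if cadena1[i] not in l1:
--                 l1.append(cadena1[i])
--             if cadena2[i] not in l2:
--                 l2.append(cadena2[i])
--         if len(l1)>len(l2):
--             cadena1=cadena2
--
--     return cadena1
-- ===== SOURCE B (Python) =====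
-- def contarLongitud(cadena1, cadena2):
--     # distinct count by sort-then-scan: in sorted order equal chars are adjacent,
--     # so the number of distinct chars is 1 + number of adjacent unequal pairs.
--     def distintos(s):
--         t = sorted(s)
--         return 0 if not t else 1 + sum(1 for a, b in zip(t, t[1:]) if a != b)
--     if (len(cadena2), distintos(cadena1)) > (len(cadena1), distintos(cadena2)):
--         return cadena2
--     return cadena1
-- ===== Notes on version B (the rewrite author's own statement) =====
-- stated objective: alternative
-- what changed: B counts distinct characters by sorting each string and counting adjacent unequal pairs (sort-then-scan) instead of A's incremental membership-list accumulation, and decides the winner with one lexicographic tuple comparison instead of if/elif branching.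
import Mathlib
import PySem

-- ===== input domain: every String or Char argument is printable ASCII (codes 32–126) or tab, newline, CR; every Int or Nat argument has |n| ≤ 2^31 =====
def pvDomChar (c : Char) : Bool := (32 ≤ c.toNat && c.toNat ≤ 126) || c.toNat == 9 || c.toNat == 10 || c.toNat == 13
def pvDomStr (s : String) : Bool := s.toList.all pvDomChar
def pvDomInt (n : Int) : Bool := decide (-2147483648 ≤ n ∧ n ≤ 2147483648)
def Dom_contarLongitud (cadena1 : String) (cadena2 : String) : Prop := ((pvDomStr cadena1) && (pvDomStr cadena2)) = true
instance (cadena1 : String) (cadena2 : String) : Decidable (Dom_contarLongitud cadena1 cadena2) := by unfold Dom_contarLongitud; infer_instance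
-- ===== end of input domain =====

-- B counts distinct chars by sort-then-scan (adjacent unequal pairs of the sorted string) and
-- decides the winner by one tuple comparison, instead of A's branching + membership-list loop (alternative).
-- ===== PORT A =====
-- len(cadena) ported via PySem.Str.len; cadena[i] ported as the Char at index i (Python's 1-char string),
-- with PySem.List.pyGetD (exact: every index produced by range(len(cadena1)) is in range in the branch taken).
def contarLongitud (cadena1 : String) (cadena2 : String) : String :=
  if PySem.Str.len cadena1 < PySem.Str.len cadena2 then cadena2
  else if PySem.Str.len cadena1 = PySem.Str.len cadena2 then
    let p := (PySem.List.pyRange 0 (PySem.List.len cadena1.toList)).foldl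
      (fun (p : List Char × List Char) i =>
        ((if PySem.List.pyGetD cadena1.toList i ' ' ∈ p.1 then p.1
          else p.1 ++ [PySem.List.pyGetD cadena1.toList i ' ']),
         (if PySem.List.pyGetD cadena2.toList i ' ' ∈ p.2 then p.2
          else p.2 ++ [PySem.List.pyGetD cadena2.toList i ' '])))
      ([], [])
    if p.2.length < p.1.length then cadena2 else cadena1
  else cadena1

-- ===== PORT B =====
-- distintos(s): sorted(s) via PySem.List.sorted; the 0/1-sum over zip(t, t[1:]) is List.countP over t.zip t.tail.
def pvDistintos (s : String) : Int :=
  let t := PySem.List.sorted s.toList (fun c => c) false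
  match t with
  | [] => 0
  | _ => 1 + ((t.zip t.tail).countP (fun p => decide (p.1 ≠ p.2)) : Int)

-- (len(cadena2), distintos(cadena1)) > (len(cadena1), distintos(cadena2)) written out lexicographically.
def contarLongitud_alt (cadena1 : String) (cadena2 : String) : String :=
  if PySem.Str.len cadena1 < PySem.Str.len cadena2 ∨
     (PySem.Str.len cadena2 = PySem.Str.len cadena1 ∧ pvDistintos cadena2 < pvDistintos cadena1)
  then cadena2 else cadena1

-- ===== PRECONDITION & SPEC =====
def Spec_contarLongitud (cadena1 : String) (cadena2 : String) (out : String) : Prop := out = contarLongitud_alt cadena1 cadena2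
instance (cadena1 : String) (cadena2 : String) (out : String) : Decidable (Spec_contarLongitud cadena1 cadena2 out) := by unfold Spec_contarLongitud; infer_instance

-- ===== CLAIM (what is proved, stated in full; the proofs are below) =====
def Claim_equal_contarLongitud : Prop := ∀ (cadena1 : String) (cadena2 : String), Dom_contarLongitud cadena1 cadena2 → Spec_contarLongitud cadena1 cadena2 (contarLongitud cadena1 cadena2)

-- ===== LEMMAS AND PROOFS =====

-- the hand-rolled "if c not in l: l.append(c)" step is exactly PySem.Set.add
theorem pvStep_eq_add : (fun (l : List Char) (a : Char) => if a ∈ l then l else l ++ [a]) = PySem.Set.add := by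
  funext l a
  simp [PySem.Set.add]

-- A's index loop over one string builds set(s) (in first-insertion order)
theorem pvLoop_eq_ofList (xs : List Char) (n : Int) (hn : n = PySem.List.len xs) :
    (PySem.List.pyRange 0 n).foldl
      (fun (l : List Char) i => if PySem.List.pyGetD xs i ' ' ∈ l then l else l ++ [PySem.List.pyGetD xs i ' ']) []
    = PySem.Set.ofList xs := by
  rw [hn, PySem.List.foldl_pyRange_pyGetD xs ' '
      (fun l a => if a ∈ l then l else l ++ [a]) [] (le_refl 0)]
  rw [pvStep_eq_add, PySem.Set.ofList_eq_foldl]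
  rfl

-- boundary-count of a list (the body of distintos after sorting), as a Nat
def pvB (t : List Char) : Nat :=
  match t with
  | [] => 0
  | _ => 1 + (t.zip t.tail).countP (fun p => decide (p.1 ≠ p.2))

theorem pvB_cons_cons (a b : Char) (r : List Char) :
    pvB (a :: b :: r) = (if a = b then 0 else 1) + pvB (b :: r) := by
  simp only [pvB, List.tail, List.zip_cons_cons, List.countP_cons]
  by_cases h : a = b <;> simp [h] <;> omega

-- in a ≤-sorted list equal elements are adjacent, so the boundary count is the number of distinct elements
theorem pvB_sorted (t : List Char) (h : t.Pairwise (· ≤ ·)) : pvB t = t.toFinset.card := by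
  induction t with
  | nil => simp [pvB]
  | cons a r ih =>
    cases r with
    | nil => simp [pvB]
    | cons b r' =>
      have hhead := (List.pairwise_cons.mp h).1
      have htail : (b :: r').Pairwise (· ≤ ·) := (List.pairwise_cons.mp h).2
      rw [pvB_cons_cons, ih htail]
      by_cases hab : a = b
      · subst hab
        simp [List.toFinset_cons]
      · have hnotmem : a ∉ b :: r' := by
          intro hmem
          rcases List.mem_cons.mp hmem with h1 | h2
          · exact hab h1
          · exact hab (le_antisymm (hhead b (by simp)) ((List.pairwise_cons.mp htail).1 a h2))
        have hcard : (a :: b :: r').toFinset.card = (b :: r').toFinset.card + 1 := by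
          rw [show (a :: b :: r').toFinset = insert a (b :: r').toFinset from List.toFinset_cons]
          exact Finset.card_insert_of_notMem (by simp only [List.mem_toFinset]; exact hnotmem)
        rw [hcard]
        simp only [hab, if_false]
        omega

-- distintos(s) equals the size of set(s)
theorem pvDistintos_eq (s : String) : pvDistintos s = ((PySem.Set.ofList s.toList).length : Int) := by
  have hsorted : (PySem.List.sorted s.toList (fun c => c) false).Pairwise (· ≤ ·) := by
    simpa using PySem.List.sorted_pairwise (xs := s.toList) (key := fun c => c)
  have hperm : (PySem.List.sorted s.toList (fun c => c) false).Perm s.toList :=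
    PySem.List.sorted_perm _ _ _
  have hB : pvB (PySem.List.sorted s.toList (fun c => c) false) = s.toList.toFinset.card := by
    rw [pvB_sorted _ hsorted, List.toFinset_eq_of_perm _ _ hperm]
  have hset : (PySem.Set.ofList s.toList).length = s.toList.toFinset.card := by
    have hnd : (PySem.Set.ofList s.toList).Nodup := PySem.Set.nodup_ofList s.toList
    have hts : (PySem.Set.ofList s.toList).toFinset = s.toList.toFinset := by
      apply Finset.ext
      intro x
      simp [List.mem_toFinset, PySem.Set.mem_ofList]
    rw [← hts, List.toFinset_card_of_nodup hnd]
  unfold pvDistintos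
  cases hc : PySem.List.sorted s.toList (fun c => c) false with
  | nil =>
    simp only [hc]
    rw [hc] at hB
    simp [pvB] at hB
    omega
  | cons x xs =>
    simp only [hc]
    rw [hc] at hB
    simp only [pvB] at hB
    rw [hset]
    rw [← hB]
    push_cast
    ring

-- ===== VERDICT (by name: the statement is the Claim_ definition above) =====
theorem contarLongitud_spec : Claim_equal_contarLongitud := by
  intro c1 c2 _
  unfold Spec_contarLongitud contarLongitud contarLongitud_alt
  rw [PySem.List.foldl_prod_mk
    (f := fun (l : List Char) i => if PySem.List.pyGetD c1.toList i ' ' ∈ l then l else l ++ [PySem.List.pyGetD c1.toList i ' '])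
    (g := fun (l : List Char) i => if PySem.List.pyGetD c2.toList i ' ' ∈ l then l else l ++ [PySem.List.pyGetD c2.toList i ' '])]
  by_cases h1 : c1.length < c2.length
  · simp [PySem.Str.len, h1]
  · by_cases h2 : c1.length = c2.length
    · have hr : PySem.List.len c1.toList = PySem.List.len c2.toList := by
        simp [PySem.List.len, h2]
      rw [pvLoop_eq_ofList c1.toList _ rfl, pvLoop_eq_ofList c2.toList _ hr]
      rw [pvDistintos_eq, pvDistintos_eq]
      simp only [PySem.Str.len]
      have hiff : ((PySem.Set.ofList c2.toList).length < (PySem.Set.ofList c1.toList).length) ↔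
          (((PySem.Set.ofList c2.toList).length : Int) < ((PySem.Set.ofList c1.toList).length : Int)) := by
        exact_mod_cast Iff.rfl
      by_cases ha : (PySem.Set.ofList c2.toList).length < (PySem.Set.ofList c1.toList).length
      · simp [ha, hiff.mp ha, h2]
      · have : ¬ (((PySem.Set.ofList c2.toList).length : Int) < ((PySem.Set.ofList c1.toList).length : Int)) :=
          fun hb => ha (hiff.mpr hb)
        simp [ha, this, h2]
    · have h3 : c2.length < c1.length := by omega
      simp [PySem.Str.len, h1, h2, Ne.symm h2]
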